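-- pv_equiv track=rewrite | github.com/veeemdee/ACM-2016 | prob_F.py | findTimes
-- ===== SOURCE A (Python) =====
-- def findTimes(n, m, T):
--    A = []
--
--    firstRow = [T[0][0]]
--    for i in range(m-1):
--       firstRow.append(firstRow[i]+T[0][i+1])
--    A.append(firstRow)
--
--    for j in range(1, n):
--       rowJ = [A[j-1][0]+T[j][0]] + [None]*(m-1)
--       A.append(rowJ)
--
--    for j in range(1, n):
--       for i in range(1, m):
--          A[j][i] = max(A[j-1][i], A[j][i-1]) + T[j][i]
--
--    result = []
--    for j in range(n):
--       result.append(A[j][m-1])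
--
--    return result
-- ===== SOURCE B (Python) =====
-- def findTimes(n, m, T):
--     # Entry-column decomposition: a right/down path reaching (j, i) enters row j at some
--     # column k <= i, so dp[j][i] = P[i] + max over k <= i of (dp[j-1][k] - P[k-1]), where
--     # P is the prefix-sum array of row j; the inner max is kept as a running maximum.
--     s = T[0][0]
--     prev = [s]
--     for x in T[0][1:m]:
--         s += x
--         prev.append(s)
--     out = [prev[-1]] if n > 0 else []
--     for j in range(1, n):
--         row = T[j]
--         s = row[0]
--         pre = [s]
--         for x in row[1:m]:
--             s += x
--             pre.append(s)
--         best = prev[0]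
--         cur = [pre[0] + best]
--         for i in range(1, len(pre)):
--             best = max(best, prev[i] - pre[i - 1])
--             cur.append(pre[i] + best)
--         out.append(cur[-1])
--         prev = cur
--     return out
-- ===== Notes on version B (the rewrite author's own statement) =====
-- stated objective: alternative
-- what changed: B abandons the max(up,left) cell recurrence: each row is summarised by its prefix-sum array P and dp[j][i] is computed as P[i] plus a running maximum of dp[j-1][k]-P[k-1] over the entry column k where the path drops into row j, collecting each row's last value in one pass instead of A's build/pre-seed/fill/extract passes over a full n-by-m table.
import Mathlib
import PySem

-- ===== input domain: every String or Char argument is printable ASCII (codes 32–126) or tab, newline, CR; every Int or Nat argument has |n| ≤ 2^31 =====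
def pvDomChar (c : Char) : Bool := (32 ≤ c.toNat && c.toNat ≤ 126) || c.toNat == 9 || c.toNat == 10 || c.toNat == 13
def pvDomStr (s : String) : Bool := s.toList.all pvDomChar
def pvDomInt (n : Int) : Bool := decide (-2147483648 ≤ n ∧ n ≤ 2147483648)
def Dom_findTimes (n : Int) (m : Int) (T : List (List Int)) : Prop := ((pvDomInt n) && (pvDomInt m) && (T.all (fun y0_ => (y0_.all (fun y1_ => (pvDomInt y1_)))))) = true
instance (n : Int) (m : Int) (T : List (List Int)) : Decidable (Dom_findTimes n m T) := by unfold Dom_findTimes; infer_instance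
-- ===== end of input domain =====

-- B replaces A's max(up,left) table DP by an entry-column decomposition: per row a prefix-sum
-- array and a running maximum of dp_prev[k] - P[k-1]; same return value on Pre_, proved below.

-- shared indexing helpers: Python xs[i] with a 0 / [] default; under Pre_ every read is in range,
-- so the default is never the value returned (it models Python's IndexError region, excluded by Pre_)
def pvAt (xs : List Int) (i : Int) : Int := (PySem.List.pyGet? xs i).getD 0
def pvRow (T : List (List Int)) (j : Int) : List Int := (PySem.List.pyGet? T j).getD []

-- ===== PORT A =====
-- literal transliteration of A; the None placeholders of `[None]*(m-1)` are modeled as 0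
-- (under Pre_ every placeholder is overwritten by the fill pass before it is read)
def findTimes (n : Int) (m : Int) (T : List (List Int)) : List Int :=
  let firstRow := (PySem.List.pyRange 0 (m-1) 1).foldl
      (fun fr i => fr ++ [pvAt fr i + pvAt (pvRow T 0) (i+1)]) [pvAt (pvRow T 0) 0]
  let tb1 := (PySem.List.pyRange 1 n 1).foldl
      (fun A j => A ++ [[pvAt (pvRow A (j-1)) 0 + pvAt (pvRow T j) 0] ++ List.replicate (m-1).toNat 0])
      [firstRow]
  let tb2 := (PySem.List.pyRange 1 n 1).foldl
      (fun A j => (PySem.List.pyRange 1 m 1).foldl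
          (fun A i => A.set j.toNat ((pvRow A j).set i.toNat
              (max (pvAt (pvRow A (j-1)) i) (pvAt (pvRow A j) (i-1)) + pvAt (pvRow T j) i))) A)
      tb1
  (PySem.List.pyRange 0 n 1).foldl (fun res j => res ++ [pvAt (pvRow tb2 j) (m-1)]) []

-- ===== PORT B =====
-- literal transliteration of Source B: first row's prefix sums (state (s, pre)), then per row a
-- prefix-sum pass and a running-max pass (state (best, cur)); out collects cur[-1] as it goes
def findTimes_alt (n : Int) (m : Int) (T : List (List Int)) : List Int :=
  let pre0 := ((PySem.List.slice (pvRow T 0) (some 1) (some m)).foldl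
      (fun (p : Int × List Int) x => (p.1 + x, p.2 ++ [p.1 + x]))
      (pvAt (pvRow T 0) 0, [pvAt (pvRow T 0) 0])).2
  let out0 : List Int := if 0 < n then [pvAt pre0 (-1)] else []
  ((PySem.List.pyRange 1 n 1).foldl
    (fun (st : List Int × List Int) j =>
      let row := pvRow T j
      let pre := ((PySem.List.slice row (some 1) (some m)).foldl
          (fun (p : Int × List Int) x => (p.1 + x, p.2 ++ [p.1 + x]))
          (pvAt row 0, [pvAt row 0])).2
      let cur := ((PySem.List.pyRange 1 (pre.length : Int) 1).foldl
          (fun (q : Int × List Int) i =>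
            let b := max q.1 (pvAt st.2 i - pvAt pre (i - 1))
            (b, q.2 ++ [pvAt pre i + b]))
          (pvAt st.2 0, [pvAt pre 0 + pvAt st.2 0])).2
      (st.1 ++ [pvAt cur (-1)], cur))
    (out0, pre0)).1

-- ===== PRECONDITION & SPEC =====
-- Pre_ is exactly the set of inputs on which the Python A returns (elsewhere it raises IndexError):
-- T[0][0] must exist and m must not exceed the first row (the first-row pass runs even for n ≤ 0);
-- for n ≥ 1 additionally n ≤ len(T), 0 ≤ m, and each of the first n rows long enough for the DP.
def Pre_findTimes (n : Int) (m : Int) (T : List (List Int)) : Prop :=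
  0 < T.length ∧ 0 < (T.headD []).length ∧ m ≤ ((T.headD []).length : Int) ∧
  (n ≤ 0 ∨ (n ≤ (T.length : Int) ∧ 0 ≤ m ∧
     ∀ j : Nat, j < n.toNat → max 1 m ≤ ((T.getD j []).length : Int)))
instance (n : Int) (m : Int) (T : List (List Int)) : Decidable (Pre_findTimes n m T) := by
  unfold Pre_findTimes; infer_instance

def pvWitness_findTimes : Int × Int × List (List Int) := (2, 3, [[1, 2, 3], [4, 5, 6]])

def Spec_findTimes (n : Int) (m : Int) (T : List (List Int)) (out : List Int) : Prop := out = findTimes_alt n m T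
instance (n : Int) (m : Int) (T : List (List Int)) (out : List Int) : Decidable (Spec_findTimes n m T out) := by unfold Spec_findTimes; infer_instance

-- ===== CLAIM (what is proved, stated in full; the proofs are below) =====
def Claim_equal_findTimes : Prop := ∀ (n : Int) (m : Int) (T : List (List Int)), Dom_findTimes n m T → Pre_findTimes n m T → Spec_findTimes n m T (findTimes n m T)

-- ===== LEMMAS AND PROOFS =====

-- last element with default 0
def lastVal (xs : List Int) : Int := xs.getLast?.getD 0

-- the mathematical first DP row / prefix-sum row after k extension steps
def rowA (t0 : List Int) : Nat → List Int
  | 0 => [pvAt t0 0]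
  | k+1 => rowA t0 k ++ [lastVal (rowA t0 k) + pvAt t0 ((k : Int)+1)]

-- a subsequent DP row with given head c, previous row prev, data row tj, after k steps
def rowB (c : Int) (prev tj : List Int) : Nat → List Int
  | 0 => [c]
  | k+1 => rowB c prev tj k ++
      [max (pvAt prev ((k : Int)+1)) (lastVal (rowB c prev tj k)) + pvAt tj ((k : Int)+1)]

-- the final DP rows
def dpR (T : List (List Int)) (m : Int) : Nat → List Int
  | 0 => rowA (pvRow T 0) (m-1).toNat
  | j+1 => rowB (pvAt (dpR T m j) 0 + pvAt (pvRow T ((j : Int)+1)) 0)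
             (dpR T m j) (pvRow T ((j : Int)+1)) (m-1).toNat

-- first-column prefix sums (heads of A's pre-seeded rows)
def colC (T : List (List Int)) : Nat → Int
  | 0 => pvAt (pvRow T 0) 0
  | j+1 => colC T j + pvAt (pvRow T ((j : Int)+1)) 0

-- A's pre-seeded table rows
def initR (T : List (List Int)) (m : Int) : Nat → List Int
  | 0 => rowA (pvRow T 0) (m-1).toNat
  | j+1 => colC T (j+1) :: List.replicate (m-1).toNat 0

theorem length_rowA (t0 : List Int) (k : Nat) : (rowA t0 k).length = k + 1 := by
  induction k with
  | zero => rfl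
  | succ k ih => simp [rowA, ih]

theorem length_rowB (c : Int) (prev tj : List Int) (k : Nat) :
    (rowB c prev tj k).length = k + 1 := by
  induction k with
  | zero => rfl
  | succ k ih => simp [rowB, ih]

theorem pvAt_neg_one (xs : List Int) : pvAt xs (-1) = lastVal xs := by
  simp [pvAt, lastVal, PySem.List.pyGet?_neg_one]

theorem lastVal_append (xs : List Int) (v : Int) : lastVal (xs ++ [v]) = v := by
  simp [lastVal]

theorem pvAt_append_left (a b : List Int) (k : Nat) (h : a.length = k + 1) :
    pvAt (a ++ b) (k : Int) = lastVal a := by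
  simp only [pvAt, PySem.List.pyGet?_natCast]
  rw [List.getElem?_append_left (by omega)]
  simp [lastVal, List.getLast?_eq_getElem?, h]

theorem pvAt_last_of_len (a : List Int) (k : Nat) (h : a.length = k + 1) :
    pvAt a (k : Int) = lastVal a := by
  have := pvAt_append_left a [] k h
  simpa using this

theorem pvAt_zero_append (a b : List Int) (h : a ≠ []) :
    pvAt (a ++ b) 0 = pvAt a 0 := by
  simp only [pvAt, PySem.List.pyGet?_zero]
  rw [List.getElem?_append_left (by cases a with | nil => simp at h | cons x xs => simp)]

theorem head_rowA (t0 : List Int) (k : Nat) : pvAt (rowA t0 k) 0 = pvAt t0 0 := by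
  induction k with
  | zero => rfl
  | succ k ih =>
    rw [rowA, pvAt_zero_append _ _ (by have := length_rowA t0 k; intro hn; simp [hn] at this)]
    exact ih

theorem head_rowB (c : Int) (prev tj : List Int) (k : Nat) :
    pvAt (rowB c prev tj k) 0 = c := by
  induction k with
  | zero => simp [rowB, pvAt]
  | succ k ih =>
    rw [rowB, pvAt_zero_append _ _ (by have := length_rowB c prev tj k; intro hn; simp [hn] at this)]
    exact ih

theorem head_dpR (T : List (List Int)) (m : Int) (j : Nat) :
    pvAt (dpR T m j) 0 = colC T j := by
  induction j with
  | zero => rw [dpR, colC, head_rowA]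
  | succ j ih => rw [dpR, head_rowB, ih, colC]

-- fold over pyRange a b 1 as a Nat-range fold
theorem foldl_pyRange_one {S : Type} (a b : Int) (f : S → Int → S) (s : S) :
    (PySem.List.pyRange a b 1).foldl f s
      = (List.range (b - a).toNat).foldl (fun s (k : Nat) => f s (a + (k : Int))) s := by
  rw [PySem.List.pyRange_one, List.foldl_map]

-- A's first-row fold computes rowA
theorem firstRow_eq (t0 : List Int) (K : Nat) :
    (List.range K).foldl (fun fr (k : Nat) => fr ++ [pvAt fr ((k : Int)) + pvAt t0 ((k : Int)+1)])
        [pvAt t0 0] = rowA t0 K := by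
  induction K with
  | zero => rfl
  | succ K ih =>
    rw [List.range_succ, List.foldl_append, ih, List.foldl_cons, List.foldl_nil, rowA,
      pvAt_last_of_len _ _ (length_rowA t0 K)]

-- rowA extends its own prefixes
theorem rowA_split (t0 : List Int) : ∀ {k K : Nat}, k ≤ K → ∃ r, rowA t0 K = rowA t0 k ++ r := by
  intro k K
  induction K with
  | zero => intro h; exact ⟨[], by interval_cases k; simp⟩
  | succ K ih =>
    intro h
    rcases Nat.lt_or_ge k (K+1) with h' | h'
    · obtain ⟨r, hr⟩ := ih (by omega)
      exact ⟨r ++ [lastVal (rowA t0 K) + pvAt t0 ((K : Int)+1)], by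
        rw [rowA, hr, List.append_assoc]⟩
    · have : k = K + 1 := by omega
      exact ⟨[], by simp [this]⟩

-- reading an earlier cell of rowA gives the earlier prefix sum
theorem pvAt_rowA (t0 : List Int) {k K : Nat} (h : k ≤ K) :
    pvAt (rowA t0 K) (k : Int) = lastVal (rowA t0 k) := by
  obtain ⟨r, hr⟩ := rowA_split t0 h
  rw [hr, pvAt_append_left _ _ _ (length_rowA t0 k)]

-- B's prefix-sum fold (state (s, pre)) computes rowA
theorem preFold_eq (t0 : List Int) (K : Nat) :
    ((List.range K).map (fun (k : Nat) => pvAt t0 ((k : Int)+1))).foldl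
        (fun (p : Int × List Int) x => (p.1 + x, p.2 ++ [p.1 + x]))
        (pvAt t0 0, [pvAt t0 0])
      = (lastVal (rowA t0 K), rowA t0 K) := by
  induction K with
  | zero => simp [rowA, lastVal]
  | succ K ih =>
    rw [List.range_succ, List.map_append, List.foldl_append, ih]
    simp only [List.map_cons, List.map_nil, List.foldl_cons, List.foldl_nil]
    rw [rowA, lastVal_append]

-- the slice row[1:m] lists exactly the cells rowA reads, when the row is long enough
theorem slice_eq_map (row : List Int) (m : Int) (hm : 0 ≤ m)
    (h1 : 1 ≤ row.length) (h2 : m ≤ (row.length : Int)) :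
    PySem.List.slice row (some 1) (some m)
      = (List.range (m-1).toNat).map (fun (k : Nat) => pvAt row ((k : Int)+1)) := by
  rw [PySem.List.slice_toNat row (by norm_num) hm]
  apply List.ext_getElem
  · simp only [List.length_take, List.length_drop, List.length_map, List.length_range]
    omega
  · intro i hi1 hi2
    simp only [List.length_take, List.length_drop] at hi1
    rw [List.getElem_take, List.getElem_drop, List.getElem_map, List.getElem_range]
    have hcast : ((i : Int) + 1) = ((i + 1 : Nat) : Int) := by push_cast; ring
    rw [hcast]
    simp only [pvAt, PySem.List.pyGet?_natCast]
    rw [List.getElem?_eq_getElem (by omega)]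
    simp [Nat.add_comm]

-- B's running-max fold (state (best, cur)) computes rowB:
-- invariant best = lastVal cur - (current prefix sum)
theorem curFold_eq (prev row : List Int) (K : Nat) :
    ∀ k, k ≤ K →
    (List.range k).foldl
        (fun (q : Int × List Int) (i : Nat) =>
          let b := max q.1 (pvAt prev (1 + (i : Int)) - pvAt (rowA row K) ((1 + (i : Int)) - 1))
          (b, q.2 ++ [pvAt (rowA row K) (1 + (i : Int)) + b]))
        (pvAt prev 0, [pvAt (rowA row K) 0 + pvAt prev 0])
      = (lastVal (rowB (pvAt row 0 + pvAt prev 0) prev row k) - lastVal (rowA row k),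
         rowB (pvAt row 0 + pvAt prev 0) prev row k) := by
  intro k
  induction k with
  | zero =>
    intro _
    rw [List.range_zero, List.foldl_nil, head_rowA]
    simp [rowB, rowA, lastVal]
  | succ k ih =>
    intro hk
    rw [List.range_succ, List.foldl_append, ih (by omega), List.foldl_cons, List.foldl_nil]
    have e1 : (1 : Int) + (k : Int) = ((k + 1 : Nat) : Int) := by push_cast; ring
    have e2 : ((k + 1 : Nat) : Int) - 1 = ((k : Nat) : Int) := by push_cast; ring
    simp only [e1, e2]
    rw [pvAt_rowA row (by omega : k ≤ K), pvAt_rowA row hk]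
    rw [rowB, lastVal_append, rowA, lastVal_append]
    have e3 : ((k : Nat) : Int) + 1 = ((k + 1 : Nat) : Int) := by push_cast; ring
    rw [e3]
    refine Prod.ext_iff.mpr ⟨by omega, ?_⟩
    have hel : lastVal (rowA row k) + pvAt row ((k+1 : Nat) : Int) +
        max (lastVal (rowB (pvAt row 0 + pvAt prev 0) prev row k) - lastVal (rowA row k))
          (pvAt prev ((k+1 : Nat) : Int) - lastVal (rowA row k))
        = max (pvAt prev ((k+1 : Nat) : Int)) (lastVal (rowB (pvAt row 0 + pvAt prev 0) prev row k))
            + pvAt row ((k+1 : Nat) : Int) := by omega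
    rw [hel]

-- pvRow on a map over range
theorem pvRow_map_range (G : Nat → List Int) (L j : Nat) (hj : j < L) :
    pvRow ((List.range L).map G) (j : Int) = G j := by
  simp [pvRow, PySem.List.pyGet?_natCast, hj]

theorem set_map_range (G : Nat → List Int) (L j : Nat) (hj : j < L) (v : List Int) :
    ((List.range L).map G).set j v
      = (List.range L).map (fun i => if i = j then v else G i) := by
  apply List.ext_getElem (by simp)
  intro i h1 h2
  simp only [List.getElem_set, List.getElem_map, List.getElem_range]
  rcases eq_or_ne i j with h | h
  · subst h; simp
  · rw [if_neg (fun hh => h hh.symm), if_neg h]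

theorem set_append_right (a b : List Int) (v : Int) :
    (a ++ b).set a.length v = a ++ b.set 0 v := by
  induction a with
  | nil => simp
  | cons x xs ih =>
    simp only [List.cons_append, List.length_cons]
    exact congrArg (List.cons x) ih

-- the inner fill loop of A, on a table whose row N+1 is partially built
theorem inner_fill (T : List (List Int)) (N L : Nat) (hN : N + 1 < L)
    (G : Nat → List Int) (c : Int) (prev tj : List Int)
    (hprev : G N = prev) (htj : tj = pvRow T ((N : Int) + 1)) (M : Nat) :
    ∀ K, K ≤ M → (hrow : G (N+1) = rowB c prev tj 0 ++ List.replicate M 0) →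
    (List.range K).foldl
        (fun A (k : Nat) => A.set (Int.toNat (1 + (N : Int)))
            ((pvRow A (1 + (N : Int))).set (Int.toNat (1 + (k : Int)))
              (max (pvAt (pvRow A ((1 + (N : Int)) - 1)) (1 + (k : Int)))
                   (pvAt (pvRow A (1 + (N : Int))) ((1 + (k : Int)) - 1))
                + pvAt (pvRow T (1 + (N : Int))) (1 + (k : Int)))))
        ((List.range L).map G)
      = ((List.range L).map G).set (N+1) (rowB c prev tj K ++ List.replicate (M - K) 0) := by
  intro K
  induction K with
  | zero =>
    intro _ hrow
    rw [List.range_zero, List.foldl_nil]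
    apply List.ext_getElem (by simp)
    intro i h1 h2
    simp only [List.getElem_set]
    split_ifs with hi
    · subst hi
      simp only [List.getElem_map, List.getElem_range]
      rw [hrow]; simp
    · rfl
  | succ K ih =>
    intro hK hrow
    rw [List.range_succ, List.foldl_append, ih (by omega) hrow, List.foldl_cons, List.foldl_nil]
    have h1N : (1 : Int) + (N : Int) = ((N+1 : Nat) : Int) := by push_cast; ring
    have h1K : (1 : Int) + (K : Int) = ((K+1 : Nat) : Int) := by push_cast; ring
    have eN : ((N+1 : Nat) : Int) - 1 = ((N : Nat) : Int) := by push_cast; ring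
    have eK : ((K+1 : Nat) : Int) - 1 = ((K : Nat) : Int) := by push_cast; ring
    simp only [h1N, h1K, Int.toNat_natCast, eN, eK]
    have hrowN1 : pvRow (((List.range L).map G).set (N+1) (rowB c prev tj K ++ List.replicate (M - K) 0)) ((N+1 : Nat) : Int)
        = rowB c prev tj K ++ List.replicate (M - K) 0 := by
      simp only [pvRow, PySem.List.pyGet?_natCast]
      rw [List.getElem?_set_self (by simpa using hN)]
      rfl
    have hrowN : pvRow (((List.range L).map G).set (N+1) (rowB c prev tj K ++ List.replicate (M - K) 0)) ((N : Nat) : Int)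
        = prev := by
      simp only [pvRow, PySem.List.pyGet?_natCast]
      rw [List.getElem?_set_ne (by omega)]
      simp [(by omega : N < L), hprev]
    rw [hrowN1, hrowN, List.set_set]
    congr 1
    have hread : pvAt (rowB c prev tj K ++ List.replicate (M - K) 0) ((K : Nat) : Int)
        = lastVal (rowB c prev tj K) := pvAt_append_left _ _ _ (length_rowB c prev tj K)
    rw [hread]
    have hlen : (rowB c prev tj K).length = K + 1 := length_rowB c prev tj K
    have hMK : M - K = (M - (K+1)) + 1 := by omega
    rw [hMK]
    have hset := set_append_right (rowB c prev tj K) (List.replicate ((M - (K+1)) + 1) 0)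
        (max (pvAt prev ((K+1 : Nat) : Int)) (lastVal (rowB c prev tj K))
          + pvAt (pvRow T ((N+1 : Nat) : Int)) ((K+1 : Nat) : Int))
    rw [hlen] at hset
    rw [hset, List.replicate_succ, List.set_cons_zero, rowB]
    have eK2 : ((K : Nat) : Int) + 1 = ((K+1 : Nat) : Int) := by push_cast; ring
    have eN2 : ((N : Nat) : Int) + 1 = ((N+1 : Nat) : Int) := by push_cast; ring
    rw [eK2, htj, eN2, List.append_cons]

-- A's pre-seed pass builds the initR table
theorem preseed_eq (T : List (List Int)) (m : Int) (K : Nat) :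
    (List.range K).foldl
        (fun A (k : Nat) => A ++ [[pvAt (pvRow A ((1 + (k : Int)) - 1)) 0 + pvAt (pvRow T (1 + (k : Int))) 0]
            ++ List.replicate (m-1).toNat 0])
        [rowA (pvRow T 0) (m-1).toNat]
      = (List.range (K+1)).map (initR T m) := by
  induction K with
  | zero => simp [initR]
  | succ K ih =>
    rw [List.range_succ, List.foldl_append, ih, List.foldl_cons, List.foldl_nil]
    have h1 : (1 + (K : Int)) - 1 = ((K : Nat) : Int) := by push_cast; ring
    have h2 : (1 : Int) + (K : Int) = ((K+1 : Nat) : Int) := by push_cast; ring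
    rw [h1, pvRow_map_range _ _ _ (by omega)]
    have hhead : pvAt (initR T m K) 0 = colC T K := by
      cases K with
      | zero => rw [initR, head_rowA, colC]
      | succ K => rw [initR, colC]; simp [pvAt]
    rw [hhead, h2]
    rw [List.range_succ (n := K+1), List.map_append]
    congr 1

-- the fill pass turns initR rows into dpR rows
theorem fill_eq (T : List (List Int)) (m : Int) (L : Nat) :
    ∀ K, K + 1 ≤ L →
    (List.range K).foldl
        (fun A (k : Nat) => (List.range (m - 1).toNat).foldl
            (fun A (k2 : Nat) => A.set (Int.toNat (1 + (k : Int)))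
              ((pvRow A (1 + (k : Int))).set (Int.toNat (1 + (k2 : Int)))
                (max (pvAt (pvRow A ((1 + (k : Int)) - 1)) (1 + (k2 : Int)))
                     (pvAt (pvRow A (1 + (k : Int))) ((1 + (k2 : Int)) - 1))
                  + pvAt (pvRow T (1 + (k : Int))) (1 + (k2 : Int))))) A)
        ((List.range L).map (initR T m))
      = (List.range L).map (fun j => if j ≤ K then dpR T m j else initR T m j) := by
  intro K
  induction K with
  | zero =>
    intro _
    rw [List.range_zero, List.foldl_nil]
    apply List.map_congr_left
    intro i hi
    split_ifs with h
    · interval_cases i; rw [initR, dpR]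
    · rfl
  | succ K ih =>
    intro hK
    rw [List.range_succ, List.foldl_append, ih (by omega), List.foldl_cons, List.foldl_nil]
    have hGN : (fun j => if j ≤ K then dpR T m j else initR T m j) K = dpR T m K := by simp
    have hGrow : (fun j => if j ≤ K then dpR T m j else initR T m j) (K+1)
        = rowB (colC T (K+1)) (dpR T m K) (pvRow T ((K : Int)+1)) 0
          ++ List.replicate (m-1).toNat 0 := by
      simp only [if_neg (by omega : ¬ K + 1 ≤ K)]
      rw [initR, rowB]; rfl
    rw [inner_fill T K L (by omega) _ (colC T (K+1)) (dpR T m K) (pvRow T ((K : Int)+1))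
        hGN rfl (m-1).toNat (m-1).toNat le_rfl hGrow]
    have hrowBK : rowB (colC T (K+1)) (dpR T m K) (pvRow T ((K : Int)+1)) (m-1).toNat
        = dpR T m (K+1) := by
      rw [dpR, head_dpR, colC]
    rw [Nat.sub_self, List.replicate_zero, List.append_nil, hrowBK]
    rw [set_map_range _ _ _ (by omega)]
    apply List.map_congr_left
    intro i hi
    by_cases h1 : i = K + 1
    · simp [h1]
    · by_cases h2 : i ≤ K
      · have h3 : i ≤ K + 1 := by omega
        simp [h1, h2, h3]
      · have h3 : ¬ i ≤ K + 1 := by omega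
        simp [h1, h2, h3]

-- generic invariant for B's outer pass (state = (result, previous dp row))
theorem fold_pair_inv (F : (List Int × List Int) → Nat → (List Int × List Int))
    (R : Nat → List Int) (bound : Nat)
    (hFs : ∀ res N, N + 1 ≤ bound →
        F (res, R N) N = (res ++ [lastVal (R (N+1))], R (N+1))) :
    ∀ N, N ≤ bound → (List.range N).foldl F ([lastVal (R 0)], R 0)
      = ((List.range (N+1)).map (fun k => lastVal (R k)), R N) := by
  intro N
  induction N with
  | zero => intro _; simp
  | succ N ih =>
    intro h
    rw [List.range_succ, List.foldl_append, ih (by omega), List.foldl_cons, List.foldl_nil]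
    rw [hFs _ N (by omega)]
    rw [List.range_succ (n := N+1), List.map_append]
    simp

theorem length_dpR (T : List (List Int)) (m : Int) (j : Nat) :
    (dpR T m j).length = (m-1).toNat + 1 := by
  cases j with
  | zero => rw [dpR]; exact length_rowA _ _
  | succ j => rw [dpR]; exact length_rowB _ _ _ _

-- extraction read equals the last element, given 0 ≤ m
theorem extract_last (T : List (List Int)) (m : Int) (hm : 0 ≤ m) (j : Nat) :
    pvAt (dpR T m j) (m - 1) = lastVal (dpR T m j) := by
  by_cases h0 : m = 0
  · subst h0; exact pvAt_neg_one _
  · have : m - 1 = (((m-1).toNat : Nat) : Int) := by omega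
    rw [this, pvAt_last_of_len _ _ (length_dpR T m j)]

theorem pvRow_zero_eq_headD (T : List (List Int)) (h : 0 < T.length) :
    pvRow T 0 = T.headD [] := by
  cases T with
  | nil => simp at h
  | cons t ts => simp [pvRow, PySem.List.pyGet?_zero]

-- B's port computes the last elements of the dpR rows
theorem alt_eq (n : Int) (m : Int) (T : List (List Int)) (hn : 0 < n)
    (hpre : Pre_findTimes n m T) :
    findTimes_alt n m T = (List.range n.toNat).map (fun k => lastVal (dpR T m k)) := by
  obtain ⟨hT, hrow0, hm0, hrest⟩ := hpre
  rcases hrest with h | ⟨hnT, hm, hrows⟩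
  · omega
  have hrow0' : pvRow T 0 = T.headD [] := pvRow_zero_eq_headD T hT
  have hK : (m-1).toNat + 1 = max 1 m.toNat := by omega
  -- first row
  have hpre0 : ((PySem.List.slice (pvRow T 0) (some 1) (some m)).foldl
      (fun (p : Int × List Int) x => (p.1 + x, p.2 ++ [p.1 + x]))
      (pvAt (pvRow T 0) 0, [pvAt (pvRow T 0) 0])).2
      = rowA (pvRow T 0) (m-1).toNat := by
    rw [slice_eq_map (pvRow T 0) m hm (by rw [hrow0']; omega) (by rw [hrow0']; exact_mod_cast hm0)]
    rw [preFold_eq]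
  unfold findTimes_alt
  simp only [hpre0, if_pos hn]
  rw [pvAt_neg_one]
  rw [foldl_pyRange_one]
  have hdp0 : rowA (pvRow T 0) (m-1).toNat = dpR T m 0 := rfl
  rw [hdp0]
  rw [fold_pair_inv _ (dpR T m) (n - 1).toNat ?_ (n-1).toNat le_rfl]
  · have : (n - 1).toNat + 1 = n.toNat := by omega
    rw [this]
  · -- one outer step: from dpR N to dpR (N+1)
    intro res N hN
    simp only []
    have hcastN : (1 : Int) + (N : Int) = ((N + 1 : Nat) : Int) := by push_cast; ring
    have hlenrow : max 1 m ≤ ((pvRow T (1 + (N : Int))).length : Int) := by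
      have h := hrows (N+1) (by omega)
      rw [hcastN]
      simp only [pvRow, PySem.List.pyGet?_natCast]
      simpa [List.getD_eq_getElem?_getD] using h
    have hpreN : ((PySem.List.slice (pvRow T (1 + (N : Int))) (some 1) (some m)).foldl
        (fun (p : Int × List Int) x => (p.1 + x, p.2 ++ [p.1 + x]))
        (pvAt (pvRow T (1 + (N : Int))) 0, [pvAt (pvRow T (1 + (N : Int))) 0])).2
        = rowA (pvRow T (1 + (N : Int))) (m-1).toNat := by
      rw [slice_eq_map (pvRow T (1 + (N : Int))) m hm (by omega) (by omega)]
      rw [preFold_eq]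
    simp only [hpreN]
    have hlenpre : ((rowA (pvRow T (1 + (N : Int))) (m-1).toNat).length : Int)
        = (((m-1).toNat + 1 : Nat) : Int) := by
      rw [length_rowA]
    rw [hlenpre, foldl_pyRange_one]
    have hrange : ((((m-1).toNat + 1 : Nat) : Int) - 1).toNat = (m-1).toNat := by omega
    rw [hrange]
    have hcur := curFold_eq (dpR T m N) (pvRow T (1 + (N : Int))) (m-1).toNat (m-1).toNat le_rfl
    rw [head_rowA] at hcur ⊢
    rw [hcur]
    simp only []
    rw [pvAt_neg_one]
    have hdp : rowB (pvAt (pvRow T (1 + (N : Int))) 0 + pvAt (dpR T m N) 0)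
        (dpR T m N) (pvRow T (1 + (N : Int))) (m-1).toNat = dpR T m (N+1) := by
      rw [dpR, add_comm (pvAt (pvRow T (1 + (N : Int))) 0),
        show ((N : Int) + 1) = 1 + (N : Int) from by ring]
    rw [hdp]

-- ===== VERDICT (by name: the statement is the Claim_ definition above) =====
theorem findTimes_spec : Claim_equal_findTimes := by
  intro n m T _ hpre
  unfold Spec_findTimes
  by_cases hn : n ≤ 0
  · unfold findTimes findTimes_alt
    rw [PySem.List.pyRange_one_eq_nil (show n ≤ (1:Int) by omega)]
    rw [PySem.List.pyRange_one_eq_nil (show n ≤ (0:Int) by omega)]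
    simp [(by omega : ¬ 0 < n)]
    omega
  · -- n ≥ 1
    push_neg at hn
    have hm : 0 ≤ m := by
      rcases hpre with ⟨_, _, _, h | ⟨_, h, _⟩⟩
      · omega
      · exact h
    have hK : (n - 1).toNat + 1 = n.toNat := by omega
    rw [alt_eq n m T hn hpre]
    unfold findTimes
    simp only [foldl_pyRange_one, zero_add, Int.sub_zero]
    rw [firstRow_eq (pvRow T 0) (m-1).toNat]
    rw [preseed_eq T m (n-1).toNat, hK]
    rw [fill_eq T m n.toNat (n-1).toNat (by omega)]
    have htb2 : (List.range n.toNat).map (fun j => if j ≤ (n-1).toNat then dpR T m j else initR T m j)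
        = (List.range n.toNat).map (dpR T m) := by
      apply List.map_congr_left
      intro i hi
      simp only [List.mem_range] at hi
      rw [if_pos (by omega)]
    rw [htb2]
    have hextr : ∀ K : Nat, K ≤ n.toNat → (List.range K).foldl
        (fun res (k : Nat) => res ++ [pvAt (pvRow ((List.range n.toNat).map (dpR T m)) ((k : Int))) (m-1)]) ([] : List Int)
        = (List.range K).map (fun k => lastVal (dpR T m k)) := by
      intro K
      induction K with
      | zero => intro _; rfl
      | succ K ihK =>
        intro hKn
        rw [List.range_succ, List.foldl_append, ihK (by omega), List.foldl_cons, List.foldl_nil]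
        rw [List.map_append]
        congr 1
        simp only [List.map_cons, List.map_nil]
        rw [pvRow_map_range _ _ _ (by omega), extract_last T m hm]
    rw [hextr n.toNat le_rfl]
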